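-- pv_equiv track=rewrite | github.com/YaroslavPlakhtyna/First_repo | 7 Module/7M_task6.py | solve_riddle
-- ===== SOURCE A (Python) =====
-- def solve_riddle(riddle, word_length, start_letter, reverse=False):
--     if reverse:
--         riddle = riddle[::-1]  # Reverse the riddle string if reverse is True
--
--     for i in range(len(riddle) - word_length + 1):
--         current_word = riddle[i:i + word_length]
--         if current_word[0] == start_letter and current_word.isalpha():
--             return current_word
--
--     return ""
-- ===== SOURCE B (Python) =====
-- def solve_riddle(riddle, word_length, start_letter, reverse=False):
--     if reverse:
--         riddle = riddle[::-1]
--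
--     n = len(riddle)
--     # run[i] = length of the maximal all-alphabetic run starting at position i
--     run = [0] * (n + 1)
--     for i in range(n - 1, -1, -1):
--         run[i] = run[i + 1] + 1 if riddle[i].isalpha() else 0
--
--     for i in range(n - word_length + 1):
--         if riddle[i] == start_letter and run[i] >= word_length:
--             return riddle[i:i + word_length]
--
--     return ""
-- ===== Notes on version B (the rewrite author's own statement) =====
-- stated objective: faster
-- what changed: Instead of slicing out each candidate word and re-checking all its characters with isalpha (O(L) per position), B precomputes in one backward pass a suffix array of alpha-run lengths, so each position is tested in O(1): riddle[i] == start_letter and run[i] >= word_length.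
-- outside the precondition, e.g. on solve_riddle('abc', -1, 'a', False): A returns 'ab', B returns 'ab'; on solve_riddle('a!c', -1, 'a', False): A raises IndexError, B returns 'a!'; on solve_riddle('ab', 0, 'a', False): A raises IndexError, B returns ''
import Mathlib
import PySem

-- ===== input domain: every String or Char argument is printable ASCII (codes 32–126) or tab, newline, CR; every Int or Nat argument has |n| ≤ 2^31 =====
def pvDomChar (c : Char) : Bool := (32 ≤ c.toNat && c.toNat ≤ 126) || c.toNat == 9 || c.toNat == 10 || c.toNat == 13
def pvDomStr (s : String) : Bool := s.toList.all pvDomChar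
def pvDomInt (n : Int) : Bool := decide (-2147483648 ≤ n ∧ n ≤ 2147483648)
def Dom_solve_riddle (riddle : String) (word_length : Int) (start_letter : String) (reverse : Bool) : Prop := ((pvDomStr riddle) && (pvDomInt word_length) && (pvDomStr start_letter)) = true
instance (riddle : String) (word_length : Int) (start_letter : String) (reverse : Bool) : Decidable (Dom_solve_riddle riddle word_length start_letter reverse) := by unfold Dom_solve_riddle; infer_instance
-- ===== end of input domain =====

-- B replaces A's per-position slice-and-isalpha re-scan (O(L) each) by a precomputed
-- suffix array of alpha-run lengths, one O(1) test per position (objective: faster, asymptotic).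

-- ===== PORT A =====
-- the 'for i in range(...)' loop of A over the list of indices
def pvAlphaLoopA (cs : List Char) (L : Int) (sl : List Char) : List Int → String
  | [] => ""
  | i :: rest =>
    let cw := PySem.List.slice cs (some i) (some (i + L))
    match PySem.List.pyGet? cw 0 with
    | none => ""   -- Python raises IndexError here (empty slice); excluded by Pre_
    | some c =>
      if [c] = sl ∧ PySem.Chars.strIsalpha cw = true then String.ofList cw
      else pvAlphaLoopA cs L sl rest

def solve_riddle (riddle : String) (word_length : Int) (start_letter : String) (reverse : Bool) : String :=
  let cs := if reverse then riddle.toList.reverse else riddle.toList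
  pvAlphaLoopA cs word_length start_letter.toList
    (PySem.List.pyRange 0 ((cs.length : Int) - word_length + 1) 1)

-- ===== PORT B =====
-- backward pass of Source B: run[i] = run[i+1]+1 if riddle[i].isalpha() else 0   (run[n] = 0)
def pvRuns : List Char → List Int
  | [] => []
  | c :: t =>
    let r := pvRuns t
    (if PySem.Chars.isalpha c then r.headD 0 + 1 else 0) :: r

-- the second loop of Source B: O(1) test per position
def pvAlphaLoopB (cs : List Char) (runs : List Int) (L : Int) (sl : List Char) : List Int → String
  | [] => ""
  | i :: rest =>
    if [PySem.List.pyGetD cs i ' '] = sl ∧ L ≤ PySem.List.pyGetD runs i 0 then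
      String.ofList (PySem.List.slice cs (some i) (some (i + L)))
    else pvAlphaLoopB cs runs L sl rest

def solve_riddle_alt (riddle : String) (word_length : Int) (start_letter : String) (reverse : Bool) : String :=
  let cs := if reverse then riddle.toList.reverse else riddle.toList
  pvAlphaLoopB cs (pvRuns cs) word_length start_letter.toList
    (PySem.List.pyRange 0 ((cs.length : Int) - word_length + 1) 1)

-- ===== PRECONDITION & SPEC =====
-- Pre_ excludes non-positive word_length: outside the task's natural domain, where A
-- raises IndexError on an empty slice or relies on negative-slice wraparound.
def Pre_solve_riddle (riddle : String) (word_length : Int) (start_letter : String) (reverse : Bool) : Prop :=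
  1 ≤ word_length
instance (riddle : String) (word_length : Int) (start_letter : String) (reverse : Bool) : Decidable (Pre_solve_riddle riddle word_length start_letter reverse) := by unfold Pre_solve_riddle; infer_instance

def pvWitness_solve_riddle : String × Int × String × Bool := ("x abc", 3, "a", false)

def Spec_solve_riddle (riddle : String) (word_length : Int) (start_letter : String) (reverse : Bool) (out : String) : Prop := out = solve_riddle_alt riddle word_length start_letter reverse
instance (riddle : String) (word_length : Int) (start_letter : String) (reverse : Bool) (out : String) : Decidable (Spec_solve_riddle riddle word_length start_letter reverse out) := by unfold Spec_solve_riddle; infer_instance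

-- ===== CLAIM (what is proved, stated in full; the proofs are below) =====
def Claim_equal_solve_riddle : Prop := ∀ (riddle : String) (word_length : Int) (start_letter : String) (reverse : Bool), Dom_solve_riddle riddle word_length start_letter reverse → Pre_solve_riddle riddle word_length start_letter reverse → Spec_solve_riddle riddle word_length start_letter reverse (solve_riddle riddle word_length start_letter reverse)

-- ===== LEMMAS AND PROOFS =====

-- proof-only helper: length of the leading all-alpha run of a list
def pvLead : List Char → Int
  | [] => 0
  | c :: t => if PySem.Chars.isalpha c then pvLead t + 1 else 0

theorem pvLead_nonneg (l : List Char) : 0 ≤ pvLead l := by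
  induction l with
  | nil => simp [pvLead]
  | cons c t ih => simp only [pvLead]; split <;> omega

theorem pvRuns_getD (cs : List Char) : ∀ k : Nat, (pvRuns cs).getD k 0 = pvLead (cs.drop k) := by
  induction cs with
  | nil => intro k; simp [pvRuns, pvLead]
  | cons c t ih =>
    intro k
    cases k with
    | zero =>
      have hh : (pvRuns t).headD 0 = (pvRuns t).getD 0 0 := by cases pvRuns t <;> simp
      simp only [pvRuns, List.getD_cons_zero, List.drop_zero, pvLead, hh, ih 0, List.drop_zero]
    | succ k => simpa [pvRuns] using ih k

theorem pvTake_alpha (m : Nat) : ∀ l : List Char, 1 ≤ m → m ≤ l.length →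
    (PySem.Chars.strIsalpha (l.take m) = true ↔ (m : Int) ≤ pvLead l) := by
  induction m with
  | zero => intro l h; omega
  | succ m ih =>
    intro l _ hlen
    cases l with
    | nil => simp at hlen
    | cons c t =>
      rcases Nat.eq_zero_or_pos m with hm | hm
      · subst hm
        have hnn := pvLead_nonneg t
        by_cases hc : PySem.Chars.isalpha c = true
        · have h1 : PySem.Chars.strIsalpha ([c]) = true := by simp [PySem.Chars.strIsalpha, hc]
          have hR : pvLead (c :: t) = pvLead t + 1 := by simp [pvLead, hc]
          simp only [List.take_succ_cons, List.take_zero, h1, hR]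
          constructor
          · intro _; omega
          · intro _; trivial
        · have h1 : PySem.Chars.strIsalpha ([c]) = false := by simp [PySem.Chars.strIsalpha, hc]
          have hR : pvLead (c :: t) = 0 := by simp [pvLead, hc]
          simp only [List.take_succ_cons, List.take_zero, h1, hR]
          constructor
          · intro h; exact absurd h (by simp)
          · intro h; omega
      · have hlt : m ≤ t.length := by simpa using hlen
        have htne : t.take m ≠ [] :=
          List.ne_nil_of_length_pos (by simp only [List.length_take]; omega)
        have hiff := ih t hm hlt
        by_cases hc : PySem.Chars.isalpha c = true
        · have heq : PySem.Chars.strIsalpha ((c :: t).take (m + 1)) = PySem.Chars.strIsalpha (t.take m) := by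
            simp [PySem.Chars.strIsalpha, hc, htne]
          rw [heq, hiff]
          simp only [pvLead, hc, if_true]
          push_cast; omega
        · have h1 : PySem.Chars.strIsalpha ((c :: t).take (m + 1)) = false := by
            simp [PySem.Chars.strIsalpha, hc]
          have hR : pvLead (c :: t) = 0 := by simp [pvLead, hc]
          rw [h1, hR]
          constructor
          · intro h; exact absurd h (by simp)
          · intro h; omega

theorem pvLoop_eq (cs : List Char) (L : Int) (hL : 1 ≤ L) (sl : List Char) :
    ∀ idxs : List Int, (∀ i ∈ idxs, 0 ≤ i ∧ i + L ≤ (cs.length : Int)) →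
      pvAlphaLoopA cs L sl idxs = pvAlphaLoopB cs (pvRuns cs) L sl idxs := by
  intro idxs
  induction idxs with
  | nil => intro _; rfl
  | cons i rest ih =>
    intro hb
    obtain ⟨hi0, hiL⟩ := hb i (List.mem_cons_self ..)
    have hrest : ∀ j ∈ rest, 0 ≤ j ∧ j + L ≤ (cs.length : Int) :=
      fun j hj => hb j (List.mem_cons_of_mem _ hj)
    have hislice : PySem.List.slice cs (some i) (some (i + L))
        = (cs.drop i.toNat).take L.toNat := by
      rw [PySem.List.slice_toNat cs hi0 (by omega)]
      congr 1; omega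
    have hmlen : L.toNat ≤ (cs.drop i.toNat).length := by
      simp only [List.length_drop]; omega
    have hklt : i.toNat < cs.length := by omega
    have hget : PySem.List.pyGet? (PySem.List.slice cs (some i) (some (i + L))) 0
        = some cs[i.toNat] := by
      rw [hislice]
      have hlen0 : 0 < ((cs.drop i.toNat).take L.toNat).length := by
        simp only [List.length_take, List.length_drop]; omega
      simp only [PySem.List.pyGet?, PySem.List.pyIdx?]
      rw [if_pos (by norm_num : (0:Int) ≤ 0), if_pos (by exact_mod_cast hlen0)]
      rw [show ((0:Int).toNat) = 0 from rfl]
      simp only [Option.bind_some]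
      rw [List.getElem?_take_of_lt (by omega), List.getElem?_drop]
      simp [List.getElem?_eq_getElem hklt]
    have hgetD : PySem.List.pyGetD cs i ' ' = cs[i.toNat] :=
      PySem.List.pyGetD_eq_getElem cs ' ' hi0 (by omega)
    have hrunsD : PySem.List.pyGetD (pvRuns cs) i 0 = pvLead (cs.drop i.toNat) := by
      rw [PySem.List.pyGetD_of_nonneg _ _ hi0, pvRuns_getD]
    have hcond : (PySem.Chars.strIsalpha (PySem.List.slice cs (some i) (some (i + L))) = true)
        ↔ (L ≤ PySem.List.pyGetD (pvRuns cs) i 0) := by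
      rw [hislice, hrunsD, pvTake_alpha L.toNat (cs.drop i.toNat) (by omega) hmlen]
      have : ((L.toNat : Int)) = L := by omega
      rw [this]
    simp only [pvAlphaLoopA, pvAlphaLoopB, hget, hgetD, hcond]
    by_cases hsl : [cs[i.toNat]] = sl
    · simp only [hsl, true_and]
      split <;> [rfl; exact ih hrest]
    · simp only [hsl, false_and, if_false]
      exact ih hrest

-- ===== VERDICT (by name: the statement is the Claim_ definition above) =====
theorem solve_riddle_spec : Claim_equal_solve_riddle := by
  intro riddle word_length start_letter reverse _ hpre
  unfold Spec_solve_riddle solve_riddle solve_riddle_alt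
  apply pvLoop_eq _ _ hpre
  intro i hi
  rw [PySem.List.mem_pyRange_one] at hi
  omega
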